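-- pv_equiv track=rewrite | github.com/songweizhi/BioSAK | BioSAK/detectCFP.py | get_pwy_ec_cutoff_by_mag_cpl
-- ===== SOURCE A (Python) =====
-- def get_pwy_ec_cutoff_by_mag_cpl(mag_cpl, mag_cpl_to_cutoff_dict, mag_cpl_threshold_list):
--
--     mag_cpl_threshold_list_high_to_low = sorted(mag_cpl_threshold_list)[::-1]
--
--     cutoffs_determined = False
--     pathway_cutoff = 0
--     key_enzyme_cutoff = 0
--     for cpl_threshold in mag_cpl_threshold_list_high_to_low:
--
--         if cutoffs_determined is False:
--             if mag_cpl >= cpl_threshold: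
--                 key_enzyme_cutoff = mag_cpl_to_cutoff_dict[cpl_threshold][0]
--                 pathway_cutoff = mag_cpl_to_cutoff_dict[cpl_threshold][1]
--                 cutoffs_determined = True
--
--     return key_enzyme_cutoff, pathway_cutoff
-- ===== SOURCE B (Python) =====
-- def get_pwy_ec_cutoff_by_mag_cpl(mag_cpl, mag_cpl_to_cutoff_dict, mag_cpl_threshold_list):
--     eligible = [t for t in mag_cpl_threshold_list if mag_cpl >= t]
--     if not eligible:
--         return 0, 0
--     best = max(eligible)
--     return mag_cpl_to_cutoff_dict[best][0], mag_cpl_to_cutoff_dict[best][1]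
-- ===== Notes on version B (the rewrite author's own statement) =====
-- stated objective: simpler
-- what changed: Replaces the sort-descending-then-scan-with-a-boolean-flag loop by a direct filter of the eligible thresholds and max() selection, removing the sort and the flag.
import Mathlib
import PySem

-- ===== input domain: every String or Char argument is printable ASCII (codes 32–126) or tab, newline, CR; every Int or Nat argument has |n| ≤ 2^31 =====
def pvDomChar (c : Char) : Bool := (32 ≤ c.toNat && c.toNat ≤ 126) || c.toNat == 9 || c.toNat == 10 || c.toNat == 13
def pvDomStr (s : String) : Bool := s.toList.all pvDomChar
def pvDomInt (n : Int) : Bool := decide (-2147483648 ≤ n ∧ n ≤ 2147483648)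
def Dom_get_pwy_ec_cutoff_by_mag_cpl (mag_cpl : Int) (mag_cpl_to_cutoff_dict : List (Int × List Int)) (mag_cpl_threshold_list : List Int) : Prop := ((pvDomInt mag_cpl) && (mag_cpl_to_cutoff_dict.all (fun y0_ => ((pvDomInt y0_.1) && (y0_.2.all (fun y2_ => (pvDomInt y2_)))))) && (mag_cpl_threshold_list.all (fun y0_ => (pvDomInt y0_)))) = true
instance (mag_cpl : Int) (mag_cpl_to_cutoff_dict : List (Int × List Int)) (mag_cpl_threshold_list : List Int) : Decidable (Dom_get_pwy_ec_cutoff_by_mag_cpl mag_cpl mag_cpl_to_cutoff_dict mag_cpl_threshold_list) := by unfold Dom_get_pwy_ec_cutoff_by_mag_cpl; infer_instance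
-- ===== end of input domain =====

-- B replaces A's sort-descending-then-flagged-scan by filter-the-eligible-thresholds + max (simpler; return value only).

-- ===== PORT A =====
-- the for-loop: state (cutoffs_determined, key_enzyme_cutoff, pathway_cutoff)
def pvLoopA (mag_cpl : Int) (d : List (Int × List Int)) :
    List Int → Bool → Int → Int → Int × Int
  | [], _, ke, pw => (ke, pw)
  | t :: rest, det, ke, pw =>
    if det = false then
      if mag_cpl ≥ t then
        let row := ((PySem.Dict.mk d).get? t).getD []   -- lookup; none = KeyError, outside Pre_
        pvLoopA mag_cpl d rest true ((PySem.List.pyGet? row 0).getD 0) ((PySem.List.pyGet? row 1).getD 0)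
      else pvLoopA mag_cpl d rest det ke pw
    else pvLoopA mag_cpl d rest det ke pw

def get_pwy_ec_cutoff_by_mag_cpl (mag_cpl : Int) (mag_cpl_to_cutoff_dict : List (Int × List Int)) (mag_cpl_threshold_list : List Int) : Int × Int :=
  let high_to_low := (PySem.List.slice? (PySem.List.sorted mag_cpl_threshold_list (fun x => x) false) none none (-1)).getD []
  pvLoopA mag_cpl mag_cpl_to_cutoff_dict high_to_low false 0 0

-- ===== PORT B =====
def get_pwy_ec_cutoff_by_mag_cpl_alt (mag_cpl : Int) (mag_cpl_to_cutoff_dict : List (Int × List Int)) (mag_cpl_threshold_list : List Int) : Int × Int :=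
  let eligible := mag_cpl_threshold_list.filter (fun t => decide (mag_cpl ≥ t))
  match PySem.List.max? eligible (fun x => x) with
  | none => (0, 0)
  | some best =>
    let row := ((PySem.Dict.mk mag_cpl_to_cutoff_dict).get? best).getD []
    (((PySem.List.pyGet? row 0).getD 0), ((PySem.List.pyGet? row 1).getD 0))

-- ===== PRECONDITION & SPEC =====
-- Pre_: where Python A returns normally — if some threshold is met, the highest met threshold
-- must be a key of the dict and its cutoff list must have at least 2 entries (else KeyError/IndexError).
def Pre_get_pwy_ec_cutoff_by_mag_cpl (mag_cpl : Int) (mag_cpl_to_cutoff_dict : List (Int × List Int)) (mag_cpl_threshold_list : List Int) : Prop :=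
  ((PySem.List.max? (mag_cpl_threshold_list.filter (fun t => decide (mag_cpl ≥ t))) (fun x => x)).all
    (fun t => ((PySem.Dict.mk mag_cpl_to_cutoff_dict).get? t).any (fun row => decide (2 ≤ row.length)))) = true
instance (mag_cpl : Int) (mag_cpl_to_cutoff_dict : List (Int × List Int)) (mag_cpl_threshold_list : List Int) : Decidable (Pre_get_pwy_ec_cutoff_by_mag_cpl mag_cpl mag_cpl_to_cutoff_dict mag_cpl_threshold_list) := by unfold Pre_get_pwy_ec_cutoff_by_mag_cpl; infer_instance

def pvWitness_get_pwy_ec_cutoff_by_mag_cpl : Int × (List (Int × List Int)) × List Int :=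
  (80, [(50, [60, 50]), (70, [80, 70])], [50, 70])

def Spec_get_pwy_ec_cutoff_by_mag_cpl (mag_cpl : Int) (mag_cpl_to_cutoff_dict : List (Int × List Int)) (mag_cpl_threshold_list : List Int) (out : Int × Int) : Prop := out = get_pwy_ec_cutoff_by_mag_cpl_alt mag_cpl mag_cpl_to_cutoff_dict mag_cpl_threshold_list
instance (mag_cpl : Int) (mag_cpl_to_cutoff_dict : List (Int × List Int)) (mag_cpl_threshold_list : List Int) (out : Int × Int) : Decidable (Spec_get_pwy_ec_cutoff_by_mag_cpl mag_cpl mag_cpl_to_cutoff_dict mag_cpl_threshold_list out) := by unfold Spec_get_pwy_ec_cutoff_by_mag_cpl; infer_instance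

-- ===== CLAIM (what is proved, stated in full; the proofs are below) =====
def Claim_equal_get_pwy_ec_cutoff_by_mag_cpl : Prop := ∀ (mag_cpl : Int) (mag_cpl_to_cutoff_dict : List (Int × List Int)) (mag_cpl_threshold_list : List Int), Dom_get_pwy_ec_cutoff_by_mag_cpl mag_cpl mag_cpl_to_cutoff_dict mag_cpl_threshold_list → Pre_get_pwy_ec_cutoff_by_mag_cpl mag_cpl mag_cpl_to_cutoff_dict mag_cpl_threshold_list → Spec_get_pwy_ec_cutoff_by_mag_cpl mag_cpl mag_cpl_to_cutoff_dict mag_cpl_threshold_list (get_pwy_ec_cutoff_by_mag_cpl mag_cpl mag_cpl_to_cutoff_dict mag_cpl_threshold_list)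

-- ===== LEMMAS AND PROOFS =====

-- once cutoffs_determined is true, the rest of the loop is a no-op
theorem pvLoopA_true (m : Int) (d : List (Int × List Int)) (l : List Int) (ke pw : Int) :
    pvLoopA m d l true ke pw = (ke, pw) := by
  induction l with
  | nil => rfl
  | cons t rest ih => simp [pvLoopA, ih]

-- the flagged scan returns the lookup at the FIRST element satisfying the test
theorem pvLoopA_head (m : Int) (d : List (Int × List Int)) (l : List Int) :
    pvLoopA m d l false 0 0 =
      match (l.filter (fun t => decide (m ≥ t))).head? with
      | none => (0, 0)
      | some t =>
        let row := ((PySem.Dict.mk d).get? t).getD []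
        (((PySem.List.pyGet? row 0).getD 0), ((PySem.List.pyGet? row 1).getD 0)) := by
  induction l with
  | nil => rfl
  | cons t rest ih =>
    by_cases h : m ≥ t
    · simp [pvLoopA, h, pvLoopA_true]
    · simp [pvLoopA, h, ih]

-- head of the descending filtered list = max of the filtered list (same Int value)
theorem head_filter_desc_eq_max (m : Int) (l : List Int) :
    ((((PySem.List.sorted l (fun x => x) false).reverse).filter (fun t => decide (m ≥ t))).head?) =
      PySem.List.max? (l.filter (fun t => decide (m ≥ t))) (fun x => x) := by
  set p : Int → Bool := fun t => decide (m ≥ t) with hp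
  have hperm : (((PySem.List.sorted l (fun x => x) false).reverse).filter p).Perm (l.filter p) := by
    exact List.Perm.filter p (((PySem.List.sorted l (fun x => x)).reverse_perm).trans (PySem.List.sorted_perm l (fun x => x) false))
  have hpw : (((PySem.List.sorted l (fun x => x) false).reverse).filter p).Pairwise (fun a b : Int => b ≤ a) := by
    refine List.Pairwise.filter p ?_
    refine List.pairwise_reverse.mpr ?_
    exact PySem.List.sorted_pairwise l (fun x => x)
  cases hdf : (((PySem.List.sorted l (fun x => x) false).reverse).filter p) with
  | nil =>
    have : l.filter p = [] := List.Perm.eq_nil (hdf ▸ hperm).symm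
    simp only [this]
    exact ((PySem.List.max?_eq_none_iff _ _).mpr rfl).symm
  | cons h t =>
    have hne : l.filter p ≠ [] := by
      intro h0
      have := (hdf ▸ hperm)
      rw [h0] at this
      exact (List.cons_ne_nil _ _) this.eq_nil
    obtain ⟨mx, hmx⟩ : ∃ mx, PySem.List.max? (l.filter p) (fun x => x) = some mx := by
      cases hc : PySem.List.max? (l.filter p) (fun x => x) with
      | none => exact absurd ((PySem.List.max?_eq_none_iff _ _).mp hc) hne
      | some mx => exact ⟨mx, rfl⟩
    have hmx_mem : mx ∈ l.filter p := PySem.List.max?_mem hmx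
    have hh_mem : h ∈ l.filter p := (hdf ▸ hperm).mem_iff.mp (by simp)
    have h1 : h ≤ mx := PySem.List.max?_isMax hmx h hh_mem
    have h2 : mx ≤ h := by
      have hmem' : mx ∈ h :: t := (hdf ▸ hperm).mem_iff.mpr hmx_mem
      rcases List.mem_cons.mp hmem' with rfl | hmem''
      · exact le_refl _
      · exact (List.pairwise_cons.mp (hdf ▸ hpw)).1 mx hmem''
    simp [hmx, le_antisymm h1 h2]

-- ===== VERDICT (by name: the statement is the Claim_ definition above) =====
theorem get_pwy_ec_cutoff_by_mag_cpl_spec : Claim_equal_get_pwy_ec_cutoff_by_mag_cpl := by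
  intro m d l _ _
  unfold Spec_get_pwy_ec_cutoff_by_mag_cpl get_pwy_ec_cutoff_by_mag_cpl get_pwy_ec_cutoff_by_mag_cpl_alt
  rw [PySem.List.slice?_none_none_neg_one]
  simp only [Option.getD_some]
  rw [pvLoopA_head, head_filter_desc_eq_max]
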